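-- pv_equiv track=rewrite | github.com/mysql/mysql-shell-plugins | migration_plugin/lib/gtid.py | gtid_contains
-- ===== SOURCE A (Python) =====
-- from typing import Dict, List, Tuple
--
-- def parse_gtid_set(gtid_set: str) -> Dict[str, List[Tuple[int, int]]]:
--     """Parse a MySQL GTID set into a dict: {UUID: [(start, end), ...]}"""
--     result: Dict[str, List[Tuple[int, int]]] = {}
--     if not gtid_set.strip():
--         return result
--     members = [s.strip() for s in gtid_set.split(",") if s.strip()]
--     for member in members:
--         fields = member.split(":")
--         uuid, interval_fields = fields[0], fields[1:]
--         intervals: List[Tuple[int, int]] = []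
--         for val in interval_fields:
--             for seg in val.split(":"):
--                 if not seg:
--                     continue
--                 if "-" in seg:
--                     start, end = map(int, seg.split("-"))
--                 else:
--                     start = end = int(seg)
--                 intervals.append((start, end))
--         if intervals:
--             result.setdefault(uuid, []).extend(intervals)
--     return result
--
-- def gtid_contains(gtid_set: str, gtid: str) -> bool:
--     """
--     Returns True if the given GTID (with tags allowed) is present in the GTID set.
--     GTID format: uuid:tag1:tag2:...:txn
--     """
--     gtid_dict = parse_gtid_set(gtid_set)
--     fields = gtid.split(":")
--     if len(fields) < 2:
--         return False
--     uuid = fields[0]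
--     txn_str = fields[-1]
--     try:
--         txn = int(txn_str)
--     except ValueError:
--         return False
--     # Look for uuid and matching interval
--     for start, end in gtid_dict.get(uuid, []):
--         if start <= txn <= end:
--             return True
--     return False
-- ===== SOURCE B (Python) =====
-- def gtid_contains(gtid_set: str, gtid: str) -> bool:
--     """
--     Returns True if the given GTID (with tags allowed) is present in the GTID set.
--     Scans the set directly for the queried uuid instead of building a full dict.
--     """
--     fields = gtid.split(":")
--     if len(fields) < 2:
--         return False
--     uuid = fields[0]
--     try:
--         txn = int(fields[-1])
--     except ValueError:
--         return False
--     for raw in gtid_set.split(","):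
--         member = raw.strip()
--         if not member:
--             continue
--         mfields = member.split(":")
--         if mfields[0] != uuid:
--             continue
--         for seg in mfields[1:]:
--             if not seg:
--                 continue
--             if "-" in seg:
--                 start_s, end_s = seg.split("-")
--                 start, end = int(start_s), int(end_s)
--             else:
--                 start = end = int(seg)
--             if start <= txn <= end:
--                 return True
--     return False
-- ===== Notes on version B (the rewrite author's own statement) =====
-- stated objective: simpler
-- what changed: Drops the parse_gtid_set helper and the uuid->intervals dict entirely: B validates the queried gtid first and then scans the comma-separated members directly, parsing interval fields only for members whose uuid matches and returning True on the first containing interval.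
import Mathlib
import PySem

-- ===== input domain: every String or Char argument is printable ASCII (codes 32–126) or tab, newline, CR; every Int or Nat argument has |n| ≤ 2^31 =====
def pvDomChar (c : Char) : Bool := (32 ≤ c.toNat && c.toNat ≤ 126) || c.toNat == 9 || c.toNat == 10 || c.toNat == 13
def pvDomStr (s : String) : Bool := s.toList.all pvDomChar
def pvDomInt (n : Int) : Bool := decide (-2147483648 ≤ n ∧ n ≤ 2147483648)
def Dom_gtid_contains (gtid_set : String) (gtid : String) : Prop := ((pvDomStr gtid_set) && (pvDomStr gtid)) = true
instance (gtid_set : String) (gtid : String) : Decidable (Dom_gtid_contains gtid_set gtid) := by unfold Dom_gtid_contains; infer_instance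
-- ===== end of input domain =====

-- B replaces A's full parse-into-a-dict with a direct scan for the queried uuid (simpler; return value only, no side effects).

-- ===== PORT A =====
-- 'if "-" in seg: start, end = map(int, seg.split("-")) else: start = end = int(seg)'; none = ValueError
def pvSegParse (seg : List Char) : Option (Int × Int) :=
  if PySem.Chars.isIn ['-'] seg then
    match PySem.Chars.splitOn seg ['-'] with
    | [a, b] =>
      match PySem.Int.ofChars? a, PySem.Int.ofChars? b with
      | some s, some e => some (s, e)
      | _, _ => none
    | _ => none
  else
    match PySem.Int.ofChars? seg with
    | some n => some (n, n)
    | none => none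

-- the two nested 'for val in interval_fields: for seg in val.split(":")' loops building 'intervals'
def pvIntervalsOfFields (ifields : List (List Char)) : Option (List (Int × Int)) :=
  ifields.foldlM (fun acc val =>
    (PySem.Chars.splitOn val [':']).foldlM (fun acc2 seg =>
      if seg = [] then some acc2
      else match pvSegParse seg with
        | some iv => some (acc2 ++ [iv])
        | none => none) acc) []

-- parse_gtid_set; none = a ValueError inside it
def pvParseGtidSet (cs : List Char) : Option (PySem.Dict (List Char) (List (Int × Int))) :=
  if PySem.Chars.strip cs = [] then some PySem.Dict.empty
  else
    let members := ((PySem.Chars.splitOn cs [',']).map PySem.Chars.strip).filter (fun s => s ≠ [])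
    members.foldlM (fun d member =>
      match PySem.Chars.splitOn member [':'] with
      | [] => none  -- unreachable: splitOn never returns []
      | uuid :: ifields =>
        match pvIntervalsOfFields ifields with
        | some intervals =>
          some (if intervals = [] then d else d.insert uuid (d.getD uuid [] ++ intervals))
        | none => none) PySem.Dict.empty

def gtid_contains (gtid_set : String) (gtid : String) : Bool :=
  match pvParseGtidSet gtid_set.toList with
  | none => false  -- Python raises here (excluded by Pre_)
  | some d =>
    let fields := PySem.Chars.splitOn gtid.toList [':']
    if fields.length < 2 then false
    else
      match PySem.Int.ofChars? (fields.getLastD []) with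
      | none => false  -- 'except ValueError: return False'
      | some txn =>
        (d.getD (fields.headD []) []).any (fun p => decide (p.1 ≤ txn ∧ txn ≤ p.2))

-- ===== PORT B =====
-- inner loop of Source B over the interval fields of a matching member; false on a seg Python B would raise on (outside Pre_)
def pvAltMemberHit (txn : Int) : List (List Char) → Bool
  | [] => false
  | seg :: rest =>
    if seg = [] then pvAltMemberHit txn rest
    else
      if PySem.Chars.isIn ['-'] seg then
        match PySem.Chars.splitOn seg ['-'] with
        | [a, b] =>
          match PySem.Int.ofChars? a, PySem.Int.ofChars? b with
          | some s, some e => if s ≤ txn ∧ txn ≤ e then true else pvAltMemberHit txn rest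
          | _, _ => false
        | _ => false
      else
        match PySem.Int.ofChars? seg with
        | some n => if n ≤ txn ∧ txn ≤ n then true else pvAltMemberHit txn rest
        | none => false

-- outer loop of Source B over the comma-separated pieces
def pvAltScan (uuid : List Char) (txn : Int) : List (List Char) → Bool
  | [] => false
  | raw :: rest =>
    let member := PySem.Chars.strip raw
    if member = [] then pvAltScan uuid txn rest
    else
      let mfields := PySem.Chars.splitOn member [':']
      if mfields.headD [] ≠ uuid then pvAltScan uuid txn rest
      else if pvAltMemberHit txn mfields.tail then true else pvAltScan uuid txn rest

def gtid_contains_alt (gtid_set : String) (gtid : String) : Bool :=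
  let fields := PySem.Chars.splitOn gtid.toList [':']
  if fields.length < 2 then false
  else
    match PySem.Int.ofChars? (fields.getLastD []) with
    | none => false
    | some txn => pvAltScan (fields.headD []) txn (PySem.Chars.splitOn gtid_set.toList [','])

-- ===== PRECONDITION & SPEC =====
def pvValidSeg (seg : List Char) : Bool :=
  if PySem.Chars.isIn ['-'] seg then
    match PySem.Chars.splitOn seg ['-'] with
    | [a, b] => (PySem.Int.ofChars? a).isSome && (PySem.Int.ofChars? b).isSome
    | _ => false
  else (PySem.Int.ofChars? seg).isSome

-- Pre_ excludes exactly the gtid_set strings on which Python A raises ValueError while parsing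
-- an interval segment (e.g. 'u:x', 'u:1-2-3'); everywhere else A returns normally.
def Pre_gtid_contains (gtid_set : String) (gtid : String) : Prop :=
  ∀ member ∈ (PySem.Chars.splitOn gtid_set.toList [',']).map PySem.Chars.strip, member ≠ [] →
    ∀ val ∈ (PySem.Chars.splitOn member [':']).tail,
      ∀ seg ∈ PySem.Chars.splitOn val [':'], seg = [] ∨ pvValidSeg seg = true

instance (gtid_set : String) (gtid : String) : Decidable (Pre_gtid_contains gtid_set gtid) := by
  unfold Pre_gtid_contains; infer_instance

def pvWitness_gtid_contains : String × String := ("u1:1-5:8, u2:7", "u1:3")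

def Spec_gtid_contains (gtid_set : String) (gtid : String) (out : Bool) : Prop := out = gtid_contains_alt gtid_set gtid
instance (gtid_set : String) (gtid : String) (out : Bool) : Decidable (Spec_gtid_contains gtid_set gtid out) := by unfold Spec_gtid_contains; infer_instance

-- ===== CLAIM (what is proved, stated in full; the proofs are below) =====
def Claim_equal_gtid_contains : Prop := ∀ (gtid_set : String) (gtid : String), Dom_gtid_contains gtid_set gtid → Pre_gtid_contains gtid_set gtid → Spec_gtid_contains gtid_set gtid (gtid_contains gtid_set gtid)

-- ===== LEMMAS AND PROOFS =====

-- the uuid and interval list a (stripped, nonempty) member denotes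
def pvIvs (segs : List (List Char)) : List (Int × Int) :=
  (segs.filter (fun s => s ≠ [])).filterMap pvSegParse

def pvMUuid (m : List Char) : List Char := (PySem.Chars.splitOn m [':']).headD []

def pvMIvs (m : List Char) : List (Int × Int) := pvIvs ((PySem.Chars.splitOn m [':']).tail)

-- splitOn structural facts (about PySem.Chars.splitOn.go's fuel loop)
theorem pv_go_ne_nil (sep : List Char) (fuel : Nat) (l cur : List Char) (acc : List (List Char)) :
    PySem.Chars.splitOn.go sep fuel l cur acc ≠ [] := by
  induction fuel generalizing l cur acc with
  | zero => simp [PySem.Chars.splitOn.go]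
  | succ fuel ih =>
    cases l with
    | nil => simp [PySem.Chars.splitOn.go]
    | cons x rest =>
      rw [PySem.Chars.splitOn.go]
      by_cases hp : sep.isPrefixOf (x :: rest)
      · rw [if_pos hp]; exact ih _ _ _
      · rw [if_neg hp]; exact ih _ _ _

theorem pv_splitOn_ne_nil (cs sep : List Char) : PySem.Chars.splitOn cs sep ≠ [] := by
  unfold PySem.Chars.splitOn; exact pv_go_ne_nil _ _ _ _ _

theorem pv_go_single (c : Char) (fuel : Nat) (l cur : List Char) (acc : List (List Char)) (h : c ∉ l) :
    PySem.Chars.splitOn.go [c] fuel l cur acc = ((cur.reverse ++ l) :: acc).reverse := by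
  induction fuel generalizing l cur acc with
  | zero => simp [PySem.Chars.splitOn.go]
  | succ fuel ih =>
    cases l with
    | nil => simp [PySem.Chars.splitOn.go]
    | cons x rest =>
      rw [PySem.Chars.splitOn.go]
      have hx : ([c].isPrefixOf (x :: rest)) = false := by
        simp [List.isPrefixOf]
        intro hcx; exact h (by simp [hcx])
      rw [hx]
      simp only [Bool.false_eq_true, if_false]
      rw [ih _ _ _ (fun hc => h (List.mem_cons_of_mem _ hc))]
      simp

-- a string containing no occurrence of the single-char separator splits into itself
theorem pv_splitOn_single (c : Char) (cs : List Char) (h : c ∉ cs) :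
    PySem.Chars.splitOn cs [c] = [cs] := by
  unfold PySem.Chars.splitOn
  rw [pv_go_single c _ cs [] [] h]
  simp

theorem pv_go_pieces (c : Char) (fuel : Nat) (l cur : List Char) (acc : List (List Char))
    (hfuel : l.length < fuel) (hacc : ∀ p ∈ acc, c ∉ p) (hcur : c ∉ cur) :
    ∀ p ∈ PySem.Chars.splitOn.go [c] fuel l cur acc, c ∉ p := by
  induction fuel generalizing l cur acc with
  | zero => omega
  | succ fuel ih =>
    cases l with
    | nil =>
      have hgo : PySem.Chars.splitOn.go [c] (fuel + 1) [] cur acc = (cur.reverse :: acc).reverse := by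
        simp [PySem.Chars.splitOn.go]
      rw [hgo]
      intro p hp
      simp only [List.mem_reverse, List.mem_cons] at hp
      rcases hp with hp | hp
      · subst hp; simp only [List.mem_reverse]; exact hcur
      · exact hacc p hp
    | cons x rest =>
      rw [PySem.Chars.splitOn.go]
      by_cases hp : [c].isPrefixOf (x :: rest)
      · rw [if_pos hp]
        have hlen : (List.drop [c].length (x :: rest)).length < fuel := by
          simp at hfuel ⊢; omega
        refine ih _ _ _ hlen ?_ (by simp)
        intro p hpm
        simp only [List.mem_cons] at hpm
        rcases hpm with hpm | hpm
        · subst hpm; simp only [List.mem_reverse]; exact hcur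
        · exact hacc p hpm
      · rw [if_neg hp]
        have hcx : c ≠ x := by
          intro hcx; apply hp; simp [List.isPrefixOf, hcx]
        refine ih _ _ _ (by simp at hfuel ⊢; omega) hacc ?_
        intro hm
        rcases List.mem_cons.mp hm with hm | hm
        · exact hcx hm
        · exact hcur hm

-- pieces of a single-char split never contain the separator
theorem pv_splitOn_pieces (c : Char) (cs : List Char) :
    ∀ p ∈ PySem.Chars.splitOn cs [c], c ∉ p := by
  unfold PySem.Chars.splitOn
  exact pv_go_pieces c _ cs [] [] (by omega) (by simp) (by simp)

-- strip cs = [] means every char of cs is whitespace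
theorem pv_strip_nil (cs : List Char) (h : PySem.Chars.strip cs = []) :
    ∀ c ∈ cs, PySem.Chars.isspace c = true := by
  unfold PySem.Chars.strip PySem.Chars.rstrip PySem.Chars.lstrip at h
  rw [List.reverse_eq_nil_iff, List.dropWhile_eq_nil_iff] at h
  have hdrop : ∀ x ∈ List.dropWhile PySem.Chars.isspace cs, PySem.Chars.isspace x = true := by
    intro x hx; exact h x (by simpa using hx)
  intro c hc
  rw [← List.takeWhile_append_dropWhile (p := PySem.Chars.isspace) (l := cs)] at hc
  rcases List.mem_append.mp hc with hc | hc
  · exact List.mem_takeWhile_imp hc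
  · exact hdrop c hc

-- a valid segment parses, and B's inline per-segment code agrees with pvSegParse
theorem pv_seg_both (txn : Int) (rest : List (List Char)) (seg : List Char)
    (hne : seg ≠ []) (h : pvValidSeg seg = true) :
    ∃ s e, pvSegParse seg = some (s, e) ∧
      pvAltMemberHit txn (seg :: rest) =
        (if s ≤ txn ∧ txn ≤ e then true else pvAltMemberHit txn rest) := by
  unfold pvValidSeg at h
  by_cases hin : PySem.Chars.isIn ['-'] seg = true
  · rw [if_pos hin] at h
    rcases hsp : PySem.Chars.splitOn seg ['-'] with _ | ⟨a, _ | ⟨b, _ | ⟨x, t⟩⟩⟩ <;>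
      rw [hsp] at h <;> try simp at h
    rcases ha : PySem.Int.ofChars? a with _ | s <;> rcases hb : PySem.Int.ofChars? b with _ | e <;>
      rw [ha, hb] at h <;> try simp at h
    refine ⟨s, e, ?_, ?_⟩
    · simp [pvSegParse, hin, hsp, ha, hb]
    · simp [pvAltMemberHit, hne, hin, hsp, ha, hb]
  · rw [if_neg hin] at h
    rcases hn : PySem.Int.ofChars? seg with _ | n <;> rw [hn] at h <;> try simp at h
    refine ⟨n, n, ?_, ?_⟩
    · simp [pvSegParse, hin, hn]
    · simp [pvAltMemberHit, hne, hin, hn]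

-- the nested interval-parsing fold of parse_gtid_set, on colon-free valid fields
theorem pv_intfold (ifields : List (List Char)) (acc : List (Int × Int))
    (hnc : ∀ v ∈ ifields, (':' : Char) ∉ v)
    (hv : ∀ v ∈ ifields, v = [] ∨ pvValidSeg v = true) :
    (ifields.foldlM (fun acc val =>
      (PySem.Chars.splitOn val [':']).foldlM (fun acc2 seg =>
        if seg = [] then some acc2
        else match pvSegParse seg with
          | some iv => some (acc2 ++ [iv])
          | none => none) acc) acc) = some (acc ++ pvIvs ifields) := by
  induction ifields generalizing acc with
  | nil => simp [List.foldlM, pvIvs]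
  | cons v rest ih =>
    have hsp : PySem.Chars.splitOn v [':'] = [v] := pv_splitOn_single ':' v (hnc v (by simp))
    rw [List.foldlM_cons]
    by_cases hnil : v = []
    · subst hnil
      have h1 : (PySem.Chars.splitOn ([] : List Char) [':']).foldlM (fun acc2 seg =>
          if seg = [] then some acc2
          else match pvSegParse seg with
            | some iv => some (acc2 ++ [iv])
            | none => none) acc = some acc := by
        rw [hsp]; rfl
      rw [h1]
      rw [show pvIvs ([] :: rest) = pvIvs rest from by simp [pvIvs]]
      exact ih acc (fun w hw => hnc w (by simp [hw])) (fun w hw => hv w (by simp [hw]))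
    · rcases hv v (by simp) with h0 | hval
      · exact absurd h0 hnil
      obtain ⟨s, e, hparse, -⟩ := pv_seg_both 0 [] v hnil hval
      have h1 : (PySem.Chars.splitOn v [':']).foldlM (fun acc2 seg =>
          if seg = [] then some acc2
          else match pvSegParse seg with
            | some iv => some (acc2 ++ [iv])
            | none => none) acc = some (acc ++ [(s, e)]) := by
        rw [hsp]
        simp [List.foldlM_cons, List.foldlM_nil, hnil, hparse]
      rw [h1]
      rw [show pvIvs (v :: rest) = (s, e) :: pvIvs rest from by simp [pvIvs, hnil, hparse]]
      rw [show acc ++ ((s, e) :: pvIvs rest) = (acc ++ [(s, e)]) ++ pvIvs rest from by simp]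
      exact ih (acc ++ [(s, e)]) (fun w hw => hnc w (by simp [hw])) (fun w hw => hv w (by simp [hw]))

theorem pv_intervals_eq (ifields : List (List Char))
    (hnc : ∀ val ∈ ifields, (':' : Char) ∉ val)
    (hv : ∀ val ∈ ifields, val = [] ∨ pvValidSeg val = true) :
    pvIntervalsOfFields ifields = some (pvIvs ifields) := by
  unfold pvIntervalsOfFields
  simpa using pv_intfold ifields [] hnc hv

-- B's inner member loop computes 'some interval of the member contains txn'
theorem pv_memberHit_eq (txn : Int) (segs : List (List Char))
    (hv : ∀ s ∈ segs, s = [] ∨ pvValidSeg s = true) :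
    pvAltMemberHit txn segs = (pvIvs segs).any (fun p => decide (p.1 ≤ txn) && decide (txn ≤ p.2)) := by
  induction segs with
  | nil => simp [pvAltMemberHit, pvIvs]
  | cons seg rest ih =>
    have ihr := ih (fun s hs => hv s (by simp [hs]))
    by_cases hnil : seg = []
    · subst hnil
      rw [show pvAltMemberHit txn ([] :: rest) = pvAltMemberHit txn rest from by
        simp [pvAltMemberHit]]
      rw [ihr]
      simp [pvIvs]
    · rcases hv seg (by simp) with h0 | hval
      · exact absurd h0 hnil
      obtain ⟨s, e, hparse, hb⟩ := pv_seg_both txn rest seg hnil hval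
      rw [hb]
      have hcons : pvIvs (seg :: rest) = (s, e) :: pvIvs rest := by
        simp [pvIvs, hnil, hparse]
      rw [hcons]
      by_cases hhit : s ≤ txn ∧ txn ≤ e
      · simp [hhit]
      · simp [hhit, ihr]

-- the dict-building fold of parse_gtid_set, characterised by lookups
theorem pv_dictfold (ms : List (List Char)) (d : PySem.Dict (List Char) (List (Int × Int)))
    (h : ∀ m ∈ ms, pvIntervalsOfFields ((PySem.Chars.splitOn m [':']).tail) = some (pvMIvs m)) :
    ∃ D, (ms.foldlM (fun d member =>
      match PySem.Chars.splitOn member [':'] with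
      | [] => none
      | uuid :: ifields =>
        match pvIntervalsOfFields ifields with
        | some intervals =>
          some (if intervals = [] then d else d.insert uuid (d.getD uuid [] ++ intervals))
        | none => none) d) = some D ∧
    ∀ u, D.getD u [] = d.getD u [] ++ ((ms.filter (fun m => pvMUuid m == u)).flatMap pvMIvs) := by
  induction ms generalizing d with
  | nil => exact ⟨d, by simp [List.foldlM], by simp⟩
  | cons m rest ih =>
    rcases hsp : PySem.Chars.splitOn m [':'] with _ | ⟨uuid, ifields⟩
    · exact absurd hsp (pv_splitOn_ne_nil m [':'])
    have hint := h m (by simp)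
    rw [hsp] at hint
    simp only [List.tail_cons] at hint
    have hmu : pvMUuid m = uuid := by simp [pvMUuid, hsp]
    obtain ⟨D, hD, hg⟩ := ih (if pvMIvs m = [] then d else d.insert uuid (d.getD uuid [] ++ pvMIvs m))
      (fun m' hm' => h m' (by simp [hm']))
    refine ⟨D, ?_, ?_⟩
    · rw [List.foldlM_cons]
      have h1 : (match PySem.Chars.splitOn m [':'] with
          | [] => none
          | uuid :: ifields =>
            match pvIntervalsOfFields ifields with
            | some intervals =>
              some (if intervals = [] then d else d.insert uuid (d.getD uuid [] ++ intervals))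
            | none => none)
          = some (if pvMIvs m = [] then d else d.insert uuid (d.getD uuid [] ++ pvMIvs m)) := by
        rw [hsp]
        simp only [hint]
      rw [h1]
      exact hD
    · intro u
      rw [hg u, List.filter_cons]
      by_cases hiv : pvMIvs m = []
      · rw [if_pos hiv]
        by_cases hu : (pvMUuid m == u) = true <;> simp [hu, hiv]
      · rw [if_neg hiv]
        by_cases hu : u = uuid
        · subst hu
          have hbu : (pvMUuid m == u) = true := by simp [hmu]
          rw [hbu]
          simp
        · have hbu : (pvMUuid m == u) = false := by
            simp [hmu]; exact fun hc => hu hc.symm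
          rw [hbu]
          simp [PySem.Dict.getD_insert, fun hc => hu hc]

-- B's outer scan, characterised over the stripped nonempty members
theorem pv_scanfold (uuid : List Char) (txn : Int) (ms : List (List Char))
    (h : ∀ m ∈ ms, ∀ s ∈ (PySem.Chars.splitOn (PySem.Chars.strip m) [':']).tail, s = [] ∨ pvValidSeg s = true) :
    pvAltScan uuid txn ms = ((ms.map PySem.Chars.strip).filter (fun s => s ≠ [])).any
      (fun m => (pvMUuid m == uuid) && (pvMIvs m).any (fun p => decide (p.1 ≤ txn) && decide (txn ≤ p.2))) := by
  induction ms with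
  | nil => simp [pvAltScan]
  | cons m rest ih =>
    have ihr := ih (fun m' hm' => h m' (by simp [hm']))
    simp only [pvAltScan]
    by_cases hnil : PySem.Chars.strip m = []
    · rw [if_pos hnil, ihr]
      simp [hnil]
    · rw [if_neg hnil]
      rcases hsp : PySem.Chars.splitOn (PySem.Chars.strip m) [':'] with _ | ⟨mu, segs⟩
      · exact absurd hsp (pv_splitOn_ne_nil _ _)
      have hmu : pvMUuid (PySem.Chars.strip m) = mu := by simp [pvMUuid, hsp]
      have hmiv : pvMIvs (PySem.Chars.strip m) = pvIvs segs := by simp [pvMIvs, hsp]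
      have hseg : ∀ s ∈ segs, s = [] ∨ pvValidSeg s = true := by
        intro s hs
        exact h m (by simp) s (by rw [hsp]; exact hs)
      rw [List.map_cons, List.filter_cons]
      simp only [List.headD_cons, List.tail_cons]
      by_cases hmatch : mu = uuid
      · rw [if_neg (show ¬(mu ≠ uuid) from fun hc => hc hmatch)]
        simp only [pv_memberHit_eq txn segs hseg]
        by_cases hhit : ((pvIvs segs).any (fun p => decide (p.1 ≤ txn) && decide (txn ≤ p.2))) = true
        · rw [if_pos hhit]
          simp [hnil, hmu, hmiv, hmatch, hhit]
        · rw [if_neg hhit]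
          simp only [Bool.not_eq_true] at hhit
          simp [hnil, hmu, hmiv, hmatch, hhit, ihr]
      · rw [if_pos hmatch]
        have hbu : (mu == uuid) = false := by simp [hmatch]
        simp [hnil, hmu, hmiv, hbu, ihr]

-- ===== VERDICT (by name: the statement is the Claim_ definition above) =====
theorem gtid_contains_spec : Claim_equal_gtid_contains := by
  intro gs g hdom hpre
  unfold Spec_gtid_contains gtid_contains gtid_contains_alt
  by_cases hstrip : PySem.Chars.strip gs.toList = []
  · have hparse : pvParseGtidSet gs.toList = some PySem.Dict.empty := by
      rw [pvParseGtidSet, if_pos hstrip]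
    have hcomma : (',' : Char) ∉ gs.toList := by
      intro hc
      have := pv_strip_nil gs.toList hstrip ',' hc
      exact absurd this (by decide)
    have hsp : PySem.Chars.splitOn gs.toList [','] = [gs.toList] := pv_splitOn_single ',' gs.toList hcomma
    have hscan : ∀ u t, pvAltScan u t [gs.toList] = false := by
      intro u t; simp [pvAltScan, hstrip]
    rw [hparse, hsp]
    by_cases hl : (PySem.Chars.splitOn g.toList [':']).length < 2
    · simp [hl]
    · rcases htxn : PySem.Int.ofChars? ((PySem.Chars.splitOn g.toList [':']).getLastD []) with _ | txn <;>
        simp [hl, hscan, PySem.Dict.getD_empty]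
  · -- per-member validity from Pre_
    have hmem : ∀ m ∈ PySem.Chars.splitOn gs.toList [','],
        ∀ s ∈ (PySem.Chars.splitOn (PySem.Chars.strip m) [':']).tail, s = [] ∨ pvValidSeg s = true := by
      intro m hm s hs
      by_cases hnil : PySem.Chars.strip m = []
      · rw [hnil] at hs
        have : PySem.Chars.splitOn ([] : List Char) [':'] = [[]] := by decide
        rw [this] at hs
        simp at hs
      · have hsmem : s ∈ PySem.Chars.splitOn (PySem.Chars.strip m) [':'] :=
          List.mem_of_mem_tail hs
        have hnc : (':' : Char) ∉ s := pv_splitOn_pieces ':' (PySem.Chars.strip m) s hsmem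
        have hone : PySem.Chars.splitOn s [':'] = [s] := pv_splitOn_single ':' s hnc
        have := hpre (PySem.Chars.strip m) (List.mem_map_of_mem hm) hnil s hs s (by rw [hone]; simp)
        exact this
    have hint : ∀ m ∈ ((PySem.Chars.splitOn gs.toList [',']).map PySem.Chars.strip).filter (fun s => s ≠ []),
        pvIntervalsOfFields ((PySem.Chars.splitOn m [':']).tail) = some (pvMIvs m) := by
      intro m hm
      rcases List.mem_filter.mp hm with ⟨hm1, hm2⟩
      rcases List.mem_map.mp hm1 with ⟨m0, hm0, rfl⟩
      have hnc : ∀ val ∈ (PySem.Chars.splitOn (PySem.Chars.strip m0) [':']).tail, (':' : Char) ∉ val := by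
        intro val hval
        exact pv_splitOn_pieces ':' _ val (List.mem_of_mem_tail hval)
      exact pv_intervals_eq _ hnc (hmem m0 hm0)
    obtain ⟨D, hD, hg⟩ := pv_dictfold
      (((PySem.Chars.splitOn gs.toList [',']).map PySem.Chars.strip).filter (fun s => s ≠ []))
      PySem.Dict.empty hint
    have hparse : pvParseGtidSet gs.toList = some D := by
      rw [pvParseGtidSet, if_neg hstrip]
      exact hD
    rw [hparse]
    by_cases hl : (PySem.Chars.splitOn g.toList [':']).length < 2
    · simp [hl]
    · simp only [if_neg hl]
      rcases htxn : PySem.Int.ofChars? ((PySem.Chars.splitOn g.toList [':']).getLastD []) with _ | txn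
      · rfl
      · show (D.getD ((PySem.Chars.splitOn g.toList [':']).headD []) []).any
            (fun p => decide (p.1 ≤ txn ∧ txn ≤ p.2))
          = pvAltScan ((PySem.Chars.splitOn g.toList [':']).headD []) txn
              (PySem.Chars.splitOn gs.toList [','])
        rw [pv_scanfold _ _ _ hmem]
        rw [hg, PySem.Dict.getD_empty, List.nil_append]
        rw [List.any_flatMap, List.any_filter]
        simp
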